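-- pv_equiv track=rewrite | github.com/leonardocfor/utilities | biology/region_filterer.py | fix_values
-- ===== SOURCE A (Python) =====
-- def fix_values(value_to_fix):
--
--     """
--     Removing extra dots in latitudes or longitudes
--     """
--     correct_value = ''
--     skip_dots = False
--     for c in value_to_fix:
--         if c != '.': correct_value+=c
--         else:
--             if not skip_dots:
--                 correct_value+=c
--                 skip_dots = True
--     return correct_value
-- ===== SOURCE B (Python) =====
-- def fix_values(value_to_fix):
--     head, sep, tail = value_to_fix.partition('.')
--     return head + sep + tail.replace('.', '')
-- ===== Notes on version B (the rewrite author's own statement) =====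
-- stated objective: simpler
-- what changed: Replaces the per-character loop with a skip_dots flag by a single partition at the first dot followed by a bulk removal of dots from the tail, moving the work into C-level string operations.
import Mathlib
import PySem

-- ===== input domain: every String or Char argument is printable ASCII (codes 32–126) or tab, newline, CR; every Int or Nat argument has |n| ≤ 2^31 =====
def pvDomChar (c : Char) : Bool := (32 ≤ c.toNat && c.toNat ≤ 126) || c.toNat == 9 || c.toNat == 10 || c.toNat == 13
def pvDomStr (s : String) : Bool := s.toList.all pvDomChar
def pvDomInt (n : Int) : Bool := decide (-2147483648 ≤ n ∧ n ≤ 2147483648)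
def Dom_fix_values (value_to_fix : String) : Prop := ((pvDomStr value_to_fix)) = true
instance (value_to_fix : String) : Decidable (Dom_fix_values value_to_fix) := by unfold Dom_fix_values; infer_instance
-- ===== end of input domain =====

-- B partitions at the first dot and bulk-removes dots from the tail, replacing A's per-char loop with a skip flag (objective: simpler).
-- ===== PORT A =====
def fix_values (value_to_fix : String) : String :=
  let r := value_to_fix.toList.foldl (fun (st : List Char × Bool) c =>
    if c ≠ '.' then (st.1 ++ [c], st.2)
    else if !st.2 then (st.1 ++ [c], true) else st) ([], false)
  String.ofList r.1

-- ===== PORT B =====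
-- str.partition('.') : (head, sep, tail); sep/tail empty when no dot occurs
def pvPartitionDot : List Char → List Char × List Char × List Char
  | [] => ([], [], [])
  | c :: cs =>
    if c = '.' then ([], ['.'], cs)
    else
      let p := pvPartitionDot cs
      (c :: p.1, p.2)

def fix_values_alt (value_to_fix : String) : String :=
  let p := pvPartitionDot value_to_fix.toList
  -- tail.replace('.', '') = remove every dot from the tail
  String.ofList (p.1 ++ p.2.1 ++ p.2.2.filter (· ≠ '.'))

-- ===== PRECONDITION & SPEC =====
def Spec_fix_values (value_to_fix : String) (out : String) : Prop := out = fix_values_alt value_to_fix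
instance (value_to_fix : String) (out : String) : Decidable (Spec_fix_values value_to_fix out) := by unfold Spec_fix_values; infer_instance

-- ===== CLAIM (what is proved, stated in full; the proofs are below) =====
def Claim_equal_fix_values : Prop := ∀ (value_to_fix : String), Dom_fix_values value_to_fix → Spec_fix_values value_to_fix (fix_values value_to_fix)

-- ===== LEMMAS AND PROOFS =====

theorem pvFoldl_true (cs : List Char) (acc : List Char) :
    cs.foldl (fun (st : List Char × Bool) c =>
      if c ≠ '.' then (st.1 ++ [c], st.2)
      else if !st.2 then (st.1 ++ [c], true) else st) (acc, true)
    = (acc ++ cs.filter (· ≠ '.'), true) := by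
  induction cs generalizing acc with
  | nil => simp
  | cons c cs ih =>
    rw [List.foldl_cons]
    by_cases h : c = '.'
    · rw [if_neg (by simp [h]), if_neg (by simp), ih]
      simp [h]
    · rw [if_pos h, ih]
      simp [h]

theorem pvFoldl_false (cs : List Char) (acc : List Char) :
    (cs.foldl (fun (st : List Char × Bool) c =>
      if c ≠ '.' then (st.1 ++ [c], st.2)
      else if !st.2 then (st.1 ++ [c], true) else st) (acc, false)).1
    = acc ++ ((pvPartitionDot cs).1 ++ (pvPartitionDot cs).2.1
        ++ (pvPartitionDot cs).2.2.filter (· ≠ '.')) := by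
  induction cs generalizing acc with
  | nil => simp [pvPartitionDot]
  | cons c cs ih =>
    rw [List.foldl_cons]
    by_cases h : c = '.'
    · rw [if_neg (by simp [h]), if_pos (by simp), pvFoldl_true]
      simp [pvPartitionDot, h]
    · rw [if_pos h, ih]
      simp [pvPartitionDot, h]

-- ===== VERDICT =====
theorem fix_values_spec : Claim_equal_fix_values := by
  intro s _
  unfold Spec_fix_values
  simp only [fix_values, fix_values_alt, pvFoldl_false]
  simp
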